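-- pv_equiv track=rewrite | github.com/miliar/Code_Jam_Webscraper | solutions_python/solutions_year16_round0_nr2/2856.py | stripNegs
-- ===== SOURCE A (Python) =====
-- def stripNegs(arr):
-- 	index = len(arr)-1
-- 	while index>=0:
-- 		if arr[index] == -1:
-- 			index = index-1
-- 		else:
-- 			break
-- 	return index+1
-- ===== SOURCE B (Python) =====
-- def stripNegs(arr):
--     result = 0
--     for i, x in enumerate(arr):
--         if x != -1:
--             result = i + 1
--     return result
-- ===== Notes on version B (the rewrite author's own statement) =====
-- stated objective: alternative
-- what changed: Replaces A's backward while-loop with early break by a single forward pass that keeps an accumulator 'index just past the last non-(-1) element'.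
import Mathlib
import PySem

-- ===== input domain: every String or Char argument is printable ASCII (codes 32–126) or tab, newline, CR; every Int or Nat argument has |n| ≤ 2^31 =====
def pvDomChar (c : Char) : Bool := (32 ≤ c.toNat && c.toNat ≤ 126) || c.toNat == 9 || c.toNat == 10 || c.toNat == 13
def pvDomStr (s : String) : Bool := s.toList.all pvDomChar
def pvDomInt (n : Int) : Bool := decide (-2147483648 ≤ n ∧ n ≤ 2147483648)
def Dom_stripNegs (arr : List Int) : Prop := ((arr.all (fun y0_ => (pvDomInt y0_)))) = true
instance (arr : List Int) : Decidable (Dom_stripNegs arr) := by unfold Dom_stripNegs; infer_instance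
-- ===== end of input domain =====

-- B replaces A's backward while-loop (break at first non-(-1) from the end) by a single
-- forward pass keeping the index just past the last non-(-1) element; objective: alternative.

-- ===== PORT A =====
-- the while loop: index moves down while arr[index] == -1, breaks otherwise; returns index+1
def stripNegsLoop (arr : List Int) (index : Int) : Int :=
  if h : index ≥ 0 then
    if PySem.List.pyGet? arr index = some (-1) then
      stripNegsLoop arr (index - 1)
    else
      index + 1
  else
    index + 1
termination_by (index + 1).toNat
decreasing_by omega

def stripNegs (arr : List Int) : Int :=
  stripNegsLoop arr ((arr.length : Int) - 1)

-- ===== PORT B =====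
def stripNegs_alt (arr : List Int) : Int :=
  (PySem.List.enumerate arr).foldl
    (fun result p => if p.2 ≠ -1 then p.1 + 1 else result) 0

-- ===== PRECONDITION & SPEC =====
def Spec_stripNegs (arr : List Int) (out : Int) : Prop := out = stripNegs_alt arr
instance (arr : List Int) (out : Int) : Decidable (Spec_stripNegs arr out) := by unfold Spec_stripNegs; infer_instance

-- ===== CLAIM (what is proved, stated in full; the proofs are below) =====
def Claim_equal_stripNegs : Prop := ∀ (arr : List Int), Dom_stripNegs arr → Spec_stripNegs arr (stripNegs arr)

-- ===== LEMMAS AND PROOFS =====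

theorem loop_neg (arr : List Int) (i : Int) (h : i < 0) : stripNegsLoop arr i = i + 1 := by
  rw [stripNegsLoop]; simp [show ¬ i ≥ 0 by omega]

theorem loop_step (arr : List Int) (i : Int) (h : 0 ≤ i) :
    stripNegsLoop arr i =
      if PySem.List.pyGet? arr i = some (-1) then stripNegsLoop arr (i - 1) else i + 1 := by
  rw [stripNegsLoop]; simp [h]

theorem pyGet?_append_lt (xs : List Int) (x : Int) (i : Int) (h0 : 0 ≤ i)
    (hi : i < (xs.length : Int)) :
    PySem.List.pyGet? (xs ++ [x]) i = PySem.List.pyGet? xs i := by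
  simp only [PySem.List.pyGet?, PySem.List.pyIdx?]
  rw [if_pos h0, if_pos h0, if_pos (show i < ((xs ++ [x]).length : Int) by simp; omega), if_pos hi]
  simp [List.getElem?_append_left (show i.toNat < xs.length by omega)]

-- the A-loop started inside xs never looks at an appended element
theorem stripNegsLoop_append (xs : List Int) (x : Int) :
    ∀ n : Nat, n ≤ xs.length →
      stripNegsLoop (xs ++ [x]) ((n : Int) - 1) = stripNegsLoop xs ((n : Int) - 1) := by
  intro n
  induction n with
  | zero => intro _; rw [loop_neg _ _ (by omega), loop_neg _ _ (by omega)]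
  | succ m ih =>
    intro hm
    have h0 : (0 : Int) ≤ (m + 1 : Nat) - 1 := by push_cast; omega
    rw [loop_step _ _ h0, loop_step _ _ h0,
        pyGet?_append_lt xs x _ h0 (by push_cast; omega)]
    split_ifs with h1
    · have : ((m + 1 : Nat) : Int) - 1 - 1 = (m : Int) - 1 := by push_cast; omega
      rw [this]; exact ih (by omega)
    · rfl

theorem stripNegs_append (xs : List Int) (x : Int) :
    stripNegs (xs ++ [x]) = if x = -1 then stripNegs xs else (xs.length : Int) + 1 := by
  unfold stripNegs
  have hlen : ((xs ++ [x]).length : Int) - 1 = (xs.length : Int) := by simp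
  rw [hlen, loop_step _ _ (by positivity)]
  have hget : PySem.List.pyGet? (xs ++ [x]) (xs.length : Int) = some x := by
    simp [PySem.List.pyGet?, PySem.List.pyIdx?]
  rw [hget]
  split_ifs with h1 h2 h3
  · exact stripNegsLoop_append xs x xs.length le_rfl
  · exact absurd (Option.some.inj h1) h2
  · exact absurd (by rw [h3]) h1
  · rfl

theorem stripNegs_alt_append (xs : List Int) (x : Int) :
    stripNegs_alt (xs ++ [x]) = if x = -1 then stripNegs_alt xs else (xs.length : Int) + 1 := by
  unfold stripNegs_alt
  rw [PySem.List.enumerate_append, List.foldl_append]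
  by_cases hx : x = -1 <;> simp [PySem.List.enumerate, hx]

theorem stripNegs_eq_alt (arr : List Int) : stripNegs arr = stripNegs_alt arr := by
  induction arr using List.reverseRecOn with
  | nil =>
    rw [show stripNegs [] = stripNegsLoop [] (-1) by rw [stripNegs]; norm_num,
        loop_neg _ _ (by omega)]
    simp [stripNegs_alt, PySem.List.enumerate]
  | append_singleton xs x ih =>
    rw [stripNegs_append, stripNegs_alt_append, ih]

-- ===== VERDICT (by name: the statement is the Claim_ definition above) =====
theorem stripNegs_spec : Claim_equal_stripNegs := by
  intro arr _
  exact stripNegs_eq_alt arr
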